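-- pv_equiv track=rewrite | github.com/Jazzyb21/CodeVU | Py4e_Problem_Solving/farmers_market.py | calculate_final_price
-- ===== SOURCE A (Python) =====
-- def calculate_final_price(selections):
--     #This range function is exclusive. So, its creates a sequence of numbers from 1 to 5
--     # If I removed adding the 1, then it will only create a sequence from 1 to 4
--     total = 0
--     for count in range(1, len(selections) + 1):
--         total = total + 7
--         if count != 1 and count % 3 == 0:
--             total = total - 1
--         if count != 1 and count % 4 == 0:
--             total = total - 2
--     return total
-- ===== SOURCE B (Python) =====
-- def calculate_final_price(selections):
--     n = len(selections)
--     return 7 * n - n // 3 - 2 * (n // 4)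
-- ===== Notes on version B (the rewrite author's own statement) =====
-- stated objective: faster
-- what changed: Replaced the per-item loop (7 each, minus 1 at every 3rd, minus 2 at every 4th) by the closed form 7n - n//3 - 2*(n//4) over n = len(selections).
import Mathlib
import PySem

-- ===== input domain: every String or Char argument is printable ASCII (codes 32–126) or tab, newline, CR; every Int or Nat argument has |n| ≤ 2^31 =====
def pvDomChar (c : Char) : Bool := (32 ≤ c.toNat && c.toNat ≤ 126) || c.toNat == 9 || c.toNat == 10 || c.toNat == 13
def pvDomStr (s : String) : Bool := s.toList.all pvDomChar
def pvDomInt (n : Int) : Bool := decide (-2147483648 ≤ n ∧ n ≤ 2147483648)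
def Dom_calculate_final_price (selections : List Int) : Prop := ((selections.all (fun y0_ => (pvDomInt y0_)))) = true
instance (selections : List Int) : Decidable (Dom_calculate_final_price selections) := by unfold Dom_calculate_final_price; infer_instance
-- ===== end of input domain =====

-- B replaces A's per-item accumulation loop by the closed form 7n - n//3 - 2*(n//4); faster (O(1) vs O(n)).

-- ===== PORT A =====
def calculate_final_price (selections : List Int) : Int :=
  (PySem.List.pyRange 1 ((selections.length : Int) + 1) 1).foldl
    (fun total count =>
      let total := total + 7
      let total := if count ≠ 1 ∧ PySem.Int.mod count 3 = 0 then total - 1 else total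
      if count ≠ 1 ∧ PySem.Int.mod count 4 = 0 then total - 2 else total) 0

-- ===== PORT B =====
def calculate_final_price_alt (selections : List Int) : Int :=
  let n : Int := (selections.length : Int)
  7 * n - PySem.Int.floordiv n 3 - 2 * PySem.Int.floordiv n 4

-- ===== PRECONDITION & SPEC =====
def Spec_calculate_final_price (selections : List Int) (out : Int) : Prop := out = calculate_final_price_alt selections
instance (selections : List Int) (out : Int) : Decidable (Spec_calculate_final_price selections out) := by unfold Spec_calculate_final_price; infer_instance

-- ===== CLAIM (what is proved, stated in full; the proofs are below) =====
def Claim_equal_calculate_final_price : Prop := ∀ (selections : List Int), Dom_calculate_final_price selections → Spec_calculate_final_price selections (calculate_final_price selections)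

-- ===== LEMMAS AND PROOFS =====

lemma pv_loop_closed (n : Nat) :
    (PySem.List.pyRange 1 ((n : Int) + 1) 1).foldl
      (fun total count =>
        let total := total + 7
        let total := if count ≠ 1 ∧ PySem.Int.mod count 3 = 0 then total - 1 else total
        if count ≠ 1 ∧ PySem.Int.mod count 4 = 0 then total - 2 else total) 0
    = 7 * (n : Int) - (n : Int) / 3 - 2 * ((n : Int) / 4) := by
  induction n with
  | zero => simp [PySem.List.pyRange_one_eq_nil]
  | succ m ih =>
    have h1 : (1 : Int) ≤ (m : Int) + 1 := by omega
    have hsplit : ((m : Int) + 1 + 1) = ((m : Int) + 1) + 1 := by ring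
    rw [show ((m + 1 : Nat) : Int) = (m : Int) + 1 by push_cast; ring,
        hsplit, PySem.List.pyRange_one_succ_right h1, List.foldl_append, ih]
    simp only [List.foldl]
    rw [PySem.Int.mod_eq_emod_of_pos (by norm_num : (0:Int) < 3),
        PySem.Int.mod_eq_emod_of_pos (by norm_num : (0:Int) < 4)]
    split_ifs with c1 c2 <;> omega

-- ===== VERDICT (by name: the statement is the Claim_ definition above) =====
theorem calculate_final_price_spec : Claim_equal_calculate_final_price := by
  intro selections _
  unfold Spec_calculate_final_price calculate_final_price calculate_final_price_alt
  rw [pv_loop_closed]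
  have e3 : PySem.Int.floordiv ((selections.length : Int)) 3 = (selections.length : Int) / 3 :=
    PySem.Int.floordiv_eq_ediv_of_pos (by norm_num)
  have e4 : PySem.Int.floordiv ((selections.length : Int)) 4 = (selections.length : Int) / 4 :=
    PySem.Int.floordiv_eq_ediv_of_pos (by norm_num)
  simp only [e3, e4]
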